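-- pv_equiv track=rewrite | github.com/the8-swan/modules_python_42 | module10/ex4/decorator_mastery.py | validate_mage_name
-- ===== SOURCE A (Python) =====
-- def validate_mage_name(name: str) -> bool:
--     counter = 0
--     for char in name:
--         if char.isalpha():
--             counter += 1
--         elif char == " ":
--             pass
--         else:
--             return False
--     if counter < 3:
--         return False
--     return True
-- ===== SOURCE B (Python) =====
-- def validate_mage_name(name: str) -> bool:
--     # Word-level validation: split on spaces, every (nonempty) word must be
--     # purely alphabetic, and the words must carry at least 3 letters in total.
--     words = [w for w in name.split(' ') if w]
--     return all(w.isalpha() for w in words) and sum(len(w) for w in words) >= 3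
-- ===== Notes on version B (the rewrite author's own statement) =====
-- stated objective: faster
-- what changed: Replaces A's per-character early-return loop with a running counter by a word-level algorithm: split the name on spaces, require every nonempty word to be fully alphabetic, and require the words' total length to be at least 3; the per-character work moves into C-implemented str.split/str.isalpha, removing the Python-level loop.
import Mathlib
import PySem

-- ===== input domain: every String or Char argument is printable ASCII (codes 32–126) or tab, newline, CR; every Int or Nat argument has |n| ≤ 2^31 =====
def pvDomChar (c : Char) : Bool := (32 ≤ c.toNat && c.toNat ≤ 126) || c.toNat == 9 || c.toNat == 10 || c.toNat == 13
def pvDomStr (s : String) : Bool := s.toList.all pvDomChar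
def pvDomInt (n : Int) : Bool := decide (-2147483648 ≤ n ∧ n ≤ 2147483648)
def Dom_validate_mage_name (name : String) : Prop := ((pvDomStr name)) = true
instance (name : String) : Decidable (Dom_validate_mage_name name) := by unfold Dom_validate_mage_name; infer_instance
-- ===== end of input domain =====

-- B validates word by word (split on spaces, each nonempty word all-alphabetic, total word length ≥ 3) instead of A's per-character early-return loop with a counter.


-- ===== PORT A =====
-- the for-loop with early return, carrying the counter
def validate_mage_name_go (chars : List Char) (counter : Nat) : Bool :=
  match chars with
  | [] => if counter < 3 then false else true
  | c :: rest =>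
    if PySem.Chars.isalpha c then validate_mage_name_go rest (counter + 1)
    else if c = ' ' then validate_mage_name_go rest counter
    else false

def validate_mage_name (name : String) : Bool :=
  validate_mage_name_go name.toList 0

-- ===== PORT B =====
def validate_mage_name_alt (name : String) : Bool :=
  -- name.split(' '): sep is the nonempty " ", exact via PySem.Chars.splitOn; keep nonempty words
  let words := (PySem.Chars.splitOn name.toList [' ']).filter (fun w => w ≠ [])
  words.all (fun w => w.all PySem.Chars.isalpha) && decide (3 ≤ (words.map List.length).sum)

-- ===== PRECONDITION & SPEC =====
def Spec_validate_mage_name (name : String) (out : Bool) : Prop := out = validate_mage_name_alt name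
instance (name : String) (out : Bool) : Decidable (Spec_validate_mage_name name out) := by unfold Spec_validate_mage_name; infer_instance

-- ===== CLAIM (what is proved, stated in full; the proofs are below) =====
def Claim_equal_validate_mage_name : Prop := ∀ (name : String), Dom_validate_mage_name name → Spec_validate_mage_name name (validate_mage_name name)

-- ===== LEMMAS AND PROOFS =====

-- A's loop = "all non-space chars alphabetic, and at least 3 of them (plus the carried counter)"
theorem validate_mage_name_go_eq (l : List Char) (n : Nat) :
    validate_mage_name_go l n =
      ((l.filter (fun c => c ≠ ' ')).all PySem.Chars.isalpha &&
        decide (3 ≤ n + (l.filter (fun c => c ≠ ' ')).length)) := by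
  induction l generalizing n with
  | nil =>
    by_cases h : n < 3 <;> simp [validate_mage_name_go, h] <;> omega
  | cons c rest ih =>
    by_cases ha : PySem.Chars.isalpha c
    · have hne : c ≠ ' ' := by
        intro h; subst h; exact absurd ha (by decide)
      simp [validate_mage_name_go, ha, hne, ih]
      congr 1
      simp only [decide_eq_decide]
      omega
    · by_cases hs : c = ' '
      · subst hs
        simp [validate_mage_name_go, ha, ih]
      · simp [validate_mage_name_go, ha, hs]

-- flatten of the pieces produced by splitting on a single space = the input with spaces removed
theorem splitOn_go_flatten (fuel : Nat) (l cur : List Char) (acc : List (List Char))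
    (h : l.length < fuel) :
    (PySem.Chars.splitOn.go [' '] fuel l cur acc).flatten =
      acc.reverse.flatten ++ cur.reverse ++ l.filter (fun c => c ≠ ' ') := by
  induction l generalizing fuel cur acc with
  | nil =>
    match fuel with
    | fuel + 1 => simp [PySem.Chars.splitOn.go]
  | cons c rest ih =>
    match fuel with
    | fuel + 1 =>
      by_cases hs : c = ' '
      · subst hs
        have hp : [' '].isPrefixOf (' ' :: rest) = true := by
          simp [List.isPrefixOf]
        simp only [PySem.Chars.splitOn.go, hp, if_true]
        rw [show List.drop [' '].length (' ' :: rest) = rest from rfl,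
          ih fuel [] (cur.reverse :: acc) (by simpa using Nat.lt_of_succ_lt_succ h)]
        simp
      · have hp : [' '].isPrefixOf (c :: rest) = false := by
          simp [List.isPrefixOf, Ne.symm hs]
        simp only [PySem.Chars.splitOn.go, hp]
        rw [if_neg (by simp), ih fuel (c :: cur) acc (Nat.lt_of_succ_lt_succ h)]
        simp [hs]

theorem splitOn_flatten (l : List Char) :
    (PySem.Chars.splitOn l [' ']).flatten = l.filter (fun c => c ≠ ' ') := by
  unfold PySem.Chars.splitOn
  rw [splitOn_go_flatten _ _ _ _ (Nat.lt_succ_self _)]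
  simp

-- dropping empty pieces changes neither the flatten
theorem flatten_filter_ne_nil {α : Type} (ws : List (List α)) :
    (ws.filter (fun w => w ≠ [])).flatten = ws.flatten := by
  induction ws with
  | nil => rfl
  | cons w rest ih =>
    by_cases h : w = []
    · simp only [List.filter_cons, h]
      simpa using ih
    · rw [List.filter_cons, if_pos (by simpa using h)]
      have ih' := ih
      simp only [ne_eq, decide_not] at ih'
      simp [ih']

-- ===== VERDICT (by name: the statement is the Claim_ definition above) =====
theorem validate_mage_name_spec : Claim_equal_validate_mage_name := by
  intro name _
  unfold Spec_validate_mage_name validate_mage_name validate_mage_name_alt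
  rw [validate_mage_name_go_eq]
  set ws := (PySem.Chars.splitOn name.toList [' ']).filter (fun w => w ≠ []) with hws
  have hfl : ws.flatten = name.toList.filter (fun c => c ≠ ' ') := by
    rw [hws, flatten_filter_ne_nil, splitOn_flatten]
  simp only [← hfl]
  simp [List.all_flatten, List.length_flatten]
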